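-- pv_equiv track=rewrite | github.com/Ophiuchus86/test_exercise_become_a_developer | test_exercise.py | foo
-- ===== SOURCE A (Python) =====
-- from collections import Counter
--
-- def foo(text):
-- 	def get_first_unique_char(word):
-- 		for char, count in Counter(word).items():
-- 			if count == 1:
-- 				return char
--
-- 	words = text.split(" ")
-- 	result1 = []
--
-- 	for word in words:
-- 		result1.append(get_first_unique_char(word))
--
-- 	return get_first_unique_char(result1)
-- ===== SOURCE B (Python) =====
-- def foo(text):
--     def first_unique(seq):
--         seq = list(seq)
--         if not seq:
--             return None
--         head, rest = seq[0], seq[1:]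
--         if head not in rest:
--             return head
--         return first_unique([x for x in rest if x != head])
--
--     return first_unique([first_unique(word) for word in text.split(" ")])
-- ===== Notes on version B (the rewrite author's own statement) =====
-- stated objective: alternative
-- what changed: Replaces the Counter frequency table with a recursive remove-and-recurse strategy: if the head occurs in the tail, delete every copy of it and recurse on the shrunken list, otherwise the head is the answer; no counts are ever computed and the list itself shrinks instead of a table being built.
import Mathlib
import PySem

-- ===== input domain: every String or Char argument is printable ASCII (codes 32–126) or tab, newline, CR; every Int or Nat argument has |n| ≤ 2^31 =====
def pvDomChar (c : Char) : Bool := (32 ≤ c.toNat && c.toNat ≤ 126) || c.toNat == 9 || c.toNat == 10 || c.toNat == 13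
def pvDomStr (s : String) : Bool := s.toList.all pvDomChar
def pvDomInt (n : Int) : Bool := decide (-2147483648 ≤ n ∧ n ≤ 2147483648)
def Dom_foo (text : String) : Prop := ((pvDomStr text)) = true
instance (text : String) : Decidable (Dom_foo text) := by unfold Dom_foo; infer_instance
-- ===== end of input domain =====

-- B replaces A's Counter frequency table by a recursive remove-and-recurse search (if the head
-- repeats in the tail, delete all its copies and recurse, else return the head); same values.

-- ===== PORT A =====
-- A's helper: iterate Counter(seq).items() in insertion order, return the first key with count 1
-- (the for-loop with early return is ported as find? over the items list).
def pyGetFirstUnique {α : Type} [BEq α] (seq : List α) : Option α :=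
  ((PySem.Dict.counter seq).items.find? (fun kv => kv.2 == 1)).map Prod.fst

def foo (text : String) : Option String :=
  let words := PySem.Chars.splitOn text.toList " ".toList
  let result1 := words.foldl
    (fun acc w => acc ++ [(pyGetFirstUnique w).map (fun c => String.ofList [c])]) []
  -- Python returns the found element itself (which may be None) or falls through to None
  match pyGetFirstUnique result1 with
  | some r => r
  | none => none

-- ===== PORT B =====
-- B's helper: empty -> None; if the head occurs in the rest, remove every copy of it and
-- recurse on the remainder, otherwise the head is the first unique element.
def firstUniqueB {α : Type} [BEq α] : List α → Option α
  | [] => none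
  | h :: t =>
      if !(t.contains h) then some h
      else firstUniqueB (t.filter (fun x => !(x == h)))
termination_by l => l.length
decreasing_by
  simp only [List.length_unattach, List.length_cons]
  exact Nat.lt_succ_of_le (le_trans (List.length_filter_le _ _) (Nat.le_of_eq List.length_attach))

def foo_alt (text : String) : Option String :=
  match firstUniqueB ((PySem.Chars.splitOn text.toList " ".toList).map
      (fun w => (firstUniqueB w).map (fun c => String.ofList [c]))) with
  | some r => r
  | none => none

-- ===== PRECONDITION & SPEC =====
def Spec_foo (text : String) (out : Option String) : Prop := out = foo_alt text
instance (text : String) (out : Option String) : Decidable (Spec_foo text out) := by unfold Spec_foo; infer_instance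

-- ===== CLAIM (what is proved, stated in full; the proofs are below) =====
def Claim_equal_foo : Prop := ∀ (text : String), Dom_foo text → Spec_foo text (foo text)

-- ===== LEMMAS AND PROOFS =====

-- filtering the deduplicated list equals filtering the list, when the predicate only holds
-- on elements occurring exactly once
theorem pv_filter_ofList {α : Type} [BEq α] [LawfulBEq α] (p : α → Bool) :
    ∀ (xs : List α), (∀ y ∈ xs, p y = true → xs.count y = 1) →
      (PySem.Set.ofList xs).filter p = xs.filter p := by
  intro xs
  induction xs with
  | nil => intro _; rfl
  | cons x xs ih =>
    intro h
    rw [PySem.Set.ofList_cons]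
    by_cases hpx : p x = true
    · have hcx : (x :: xs).count x = 1 := h x (List.mem_cons_self) hpx
      have hx : x ∉ xs := by
        have h1 : (x :: xs).count x = xs.count x + 1 := List.count_cons_self
        exact List.count_eq_zero.mp (by omega)
      have hdis : (PySem.Set.ofList xs).discard x = PySem.Set.ofList xs := by
        unfold PySem.Set.discard
        apply List.filter_eq_self.mpr
        intro y hy
        have hym : y ∈ xs := (PySem.Set.mem_ofList _ _).mp hy
        simp only [Bool.not_eq_true', beq_eq_false_iff_ne]
        exact fun he => hx (he ▸ hym)
      rw [hdis, List.filter_cons_of_pos hpx, List.filter_cons_of_pos hpx]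
      congr 1
      apply ih
      intro y hy hpy
      have hyx : y ≠ x := fun he => hx (he ▸ hy)
      have hc := h y (List.mem_cons_of_mem x hy) hpy
      rwa [List.count_cons_of_ne (Ne.symm hyx)] at hc
    · rw [List.filter_cons_of_neg hpx, List.filter_cons_of_neg hpx]
      have hpx' : p x = false := by simpa using hpx
      unfold PySem.Set.discard
      rw [List.filter_filter]
      have hpred : (fun y => p y && !(y == x)) = p := by
        funext y
        by_cases hyx : y = x
        · subst hyx; simp [hpx']
        · simp [hyx]
      rw [hpred]
      apply ih
      intro y hy hpy
      have hyx : y ≠ x := fun he => by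
        rw [he] at hpy; exact absurd hpy hpx
      have hc := h y (List.mem_cons_of_mem x hy) hpy
      rwa [List.count_cons_of_ne (Ne.symm hyx)] at hc

-- A's Counter scan computes the first element of count 1
theorem pvA_eq_find {α : Type} [BEq α] [LawfulBEq α] (seq : List α) :
    pyGetFirstUnique seq = seq.find? (fun x => seq.count x == 1) := by
  unfold pyGetFirstUnique
  rw [PySem.Dict.items_counter, List.find?_map]
  have hpred : ((fun kv : α × Int => kv.2 == 1) ∘ (fun k => (k, (seq.count k : Int))))
      = (fun x => seq.count x == 1) := by
    funext k
    by_cases h : seq.count k = 1 <;> simp [h]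
  rw [hpred, Option.map_map]
  have hfst : (Prod.fst ∘ fun k : α => (k, (seq.count k : Int))) = id := by
    funext k; rfl
  rw [hfst, Option.map_id]
  rw [← List.head?_filter, ← List.head?_filter]
  have hc : ∀ y ∈ seq, ((seq.count y == 1) = true) → seq.count y = 1 :=
    fun y _ hy => by simpa using hy
  rw [pv_filter_ofList _ seq hc]
  rfl

-- skipping elements on which the predicate is false does not change find?
theorem pv_find?_filter {α : Type} (p r : α → Bool) :
    ∀ (t : List α), (∀ x ∈ t, p x = true → r x = true) →
      (t.filter r).find? p = t.find? p := by
  intro t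
  induction t with
  | nil => intro _; rfl
  | cons x t ih =>
    intro h
    by_cases hpx : p x = true
    · rw [List.filter_cons_of_pos (h x List.mem_cons_self hpx)]
      simp [List.find?, hpx]
    · have hpx' : p x = false := by simpa using hpx
      by_cases hrx : r x = true
      · rw [List.filter_cons_of_pos hrx]
        simp only [List.find?, hpx']
        exact ih (fun y hy => h y (List.mem_cons_of_mem x hy))
      · rw [List.filter_cons_of_neg hrx]
        simp only [List.find?, hpx']
        exact ih (fun y hy => h y (List.mem_cons_of_mem x hy))

theorem pv_find?_congr {α : Type} (p q : α → Bool) :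
    ∀ (t : List α), (∀ x ∈ t, p x = q x) → t.find? p = t.find? q := by
  intro t
  induction t with
  | nil => intro _; rfl
  | cons x t ih =>
    intro h
    simp only [List.find?, h x List.mem_cons_self]
    cases hq : q x with
    | true => rfl
    | false => exact ih (fun y hy => h y (List.mem_cons_of_mem x hy))

theorem firstUniqueB_nil {α : Type} [BEq α] : firstUniqueB ([] : List α) = none := by
  rw [firstUniqueB.eq_def]

theorem firstUniqueB_cons {α : Type} [BEq α] (h : α) (t : List α) :
    firstUniqueB (h :: t) = if !(t.contains h) then some h
      else firstUniqueB (t.filter (fun x => !(x == h))) := by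
  rw [firstUniqueB.eq_def]

-- the remove-and-recurse search also computes the first element of count 1
theorem pv_find_eq_B_aux {α : Type} [BEq α] [LawfulBEq α] :
    ∀ (n : Nat) (seq : List α), seq.length ≤ n →
      seq.find? (fun x => seq.count x == 1) = firstUniqueB seq := by
  intro n
  induction n with
  | zero =>
    intro seq hl
    have hs : seq = [] := List.eq_nil_of_length_eq_zero (Nat.le_zero.mp hl)
    subst hs
    rw [firstUniqueB_nil]
    rfl
  | succ n ih =>
    intro seq hl
    cases seq with
    | nil =>
      rw [firstUniqueB_nil]
      rfl
    | cons h t =>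
      rw [firstUniqueB_cons]
      by_cases hcon : t.contains h = true
      · have hmem : h ∈ t := by simpa using hcon
        rw [if_neg (by simp [hmem])]
        have hch : ((h :: t).count h == 1) = false := by
          have h1 : 1 ≤ t.count h := List.one_le_count_iff.mpr hmem
          have h2 : (h :: t).count h = t.count h + 1 := List.count_cons_self
          simp only [beq_eq_false_iff_ne]
          omega
        simp only [List.find?, hch]
        have hl' : t.length ≤ n := by
          have : t.length + 1 ≤ n + 1 := by simpa using hl
          omega
        have hlen : (t.filter (fun x => !(x == h))).length ≤ n :=
          le_trans (List.length_filter_le _ _) hl'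
        rw [← ih _ hlen]
        have hskip : (t.filter (fun x => !(x == h))).find? (fun x => (h :: t).count x == 1)
            = t.find? (fun x => (h :: t).count x == 1) := by
          apply pv_find?_filter
          intro x hx hpx
          have hxcount : (h :: t).count x = 1 := by simpa using hpx
          simp only [Bool.not_eq_true', beq_eq_false_iff_ne]
          intro he
          subst he
          have h1 : 1 ≤ t.count x := List.one_le_count_iff.mpr hx
          have h2 : (x :: t).count x = t.count x + 1 := List.count_cons_self
          omega
        rw [← hskip]
        apply pv_find?_congr
        intro x hx
        have hxt : x ∈ t := (List.mem_filter.mp hx).1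
        have hxh : x ≠ h := by
          have := (List.mem_filter.mp hx).2
          simpa using this
        have e1 : (h :: t).count x = t.count x := List.count_cons_of_ne (Ne.symm hxh)
        have e2 : (t.filter (fun y => !(y == h))).count x = t.count x := by
          rw [List.count_filter]
          simp [hxh]
        rw [e1, e2]
      · have hmem : h ∉ t := by simpa using hcon
        rw [if_pos (by simp [hmem])]
        simp [List.find?, List.count_cons_self, List.count_eq_zero.mpr hmem]

theorem pv_find_eq_B {α : Type} [BEq α] [LawfulBEq α] (seq : List α) :
    seq.find? (fun x => seq.count x == 1) = firstUniqueB seq :=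
  pv_find_eq_B_aux seq.length seq le_rfl

theorem pv_firstUnique_eq {α : Type} [BEq α] [LawfulBEq α] (seq : List α) :
    pyGetFirstUnique seq = firstUniqueB seq :=
  (pvA_eq_find seq).trans (pv_find_eq_B seq)

-- ===== VERDICT (by name: the statement is the Claim_ definition above) =====
theorem foo_spec : Claim_equal_foo := by
  intro text _
  show foo text = foo_alt text
  unfold foo foo_alt
  simp only [PySem.List.foldl_append_singleton_eq_map, List.nil_append, pv_firstUnique_eq]
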